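-- pv_equiv track=rewrite | github.com/StableExo/StableWarden | puzzle/kangaroo_worker.py | batch_inverse
-- ===== SOURCE A (Python) =====
-- from typing import Optional, Tuple, List
--
-- P  = 0xFFFFFFFFFFFFFFFFFFFFFFFFFFFFFFFFFFFFFFFFFFFFFFFFFFFFFFFEFFFFFC2F
--
-- def batch_inverse(vals: List[int]) -> List[int]:
--     """n inverses for the cost of 1 pow(). Gemini: Montgomery method."""
--     n = len(vals)
--     if n == 0: return []
--     prefix = [0] * n
--     prefix[0] = vals[0]
--     for i in range(1, n):
--         prefix[i] = (prefix[i - 1] * vals[i]) % P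
--     curr_inv = pow(prefix[-1], -1, P)   # EEA — faster than P-2 Fermat
--     res = [0] * n
--     for i in range(n - 1, 0, -1):
--         res[i] = (curr_inv * prefix[i - 1]) % P
--         curr_inv = (curr_inv * vals[i]) % P
--     res[0] = curr_inv
--     return res
-- ===== SOURCE B (Python) =====
-- P = 0xFFFFFFFFFFFFFFFFFFFFFFFFFFFFFFFFFFFFFFFFFFFFFFFFFFFFFFFEFFFFFC2F
--
--
-- def batch_inverse(vals):
--     """Prefix- and suffix-product arrays combined in one forward pass,
--     with a single modular inversion of the total product."""
--     n = len(vals)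
--     if n == 0:
--         return []
--     pre = [vals[0]]
--     for v in vals[1:]:
--         pre.append(pre[-1] * v % P)
--     suf = []
--     s = 1
--     for v in reversed(vals):
--         s = s * v % P
--         suf.append(s)
--     suf.reverse()
--     inv_total = pow(pre[-1], -1, P)
--     return [inv_total * (pre[i - 1] if i else 1) * (suf[i + 1] if i + 1 < n else 1) % P
--             for i in range(n)]
-- ===== Notes on version B (the rewrite author's own statement) =====
-- stated objective: alternative
-- what changed: A fills the result in place walking backward with a rolling inverse accumulator (curr_inv updated by multiplying the current value each step); B instead materializes an explicit suffix-product array next to the prefix-product array and emits each result in a single forward comprehension as inv_total * pre[i-1] * suf[i+1] mod P.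
-- outside the precondition, e.g. on batch_inverse([0]): A raises ValueError, B raises ValueError; on batch_inverse([3, 0, 5]): A raises ValueError, B raises ValueError
import Mathlib
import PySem

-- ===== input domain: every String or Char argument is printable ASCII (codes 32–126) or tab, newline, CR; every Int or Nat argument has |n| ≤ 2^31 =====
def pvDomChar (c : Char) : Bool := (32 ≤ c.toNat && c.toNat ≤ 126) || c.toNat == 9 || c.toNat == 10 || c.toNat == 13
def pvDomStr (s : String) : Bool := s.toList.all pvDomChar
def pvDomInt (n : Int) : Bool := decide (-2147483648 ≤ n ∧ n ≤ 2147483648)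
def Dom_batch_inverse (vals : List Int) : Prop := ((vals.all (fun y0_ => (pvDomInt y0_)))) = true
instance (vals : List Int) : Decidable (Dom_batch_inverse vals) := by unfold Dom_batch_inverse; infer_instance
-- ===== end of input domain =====

-- B replaces A's rolling backward-inverse accumulator by explicit prefix- and suffix-product
-- arrays combined in one forward comprehension (objective: alternative decomposition, same cost).

-- ===== PORT A =====
def pvP : Int := 115792089237316195423570985008687907853269984665640564039457584007908834671663

-- port of the built-in pow(x, -1, pvP): extended-Euclid coefficient reduced into [0, pvP);
-- exact exactly where the inverse exists (gcd(x, pvP) = 1), which Pre_ guarantees.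
def pvModInv (x : Int) : Int := PySem.Int.mod (Int.gcdA x pvP) pvP

def batch_inverse (vals : List Int) : List Int :=
  let n : Int := PySem.List.len vals
  if n == 0 then []
  else
    let pfx0 : List Int := List.replicate vals.length 0
    let pfx1 := PySem.List.pySetD pfx0 0 (PySem.List.pyGetD vals 0 0)
    let pfx := (PySem.List.pyRange 1 n 1).foldl
      (fun pr i =>
        PySem.List.pySetD pr i
          (PySem.Int.mod (PySem.List.pyGetD pr (i - 1) 0 * PySem.List.pyGetD vals i 0) pvP))
      pfx1
    let currInv := pvModInv (PySem.List.pyGetD pfx (-1) 0)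
    let res0 : List Int := List.replicate vals.length 0
    let st := (PySem.List.pyRange (n - 1) 0 (-1)).foldl
      (fun (st : List Int × Int) i =>
        (PySem.List.pySetD st.1 i
           (PySem.Int.mod (st.2 * PySem.List.pyGetD pfx (i - 1) 0) pvP),
         PySem.Int.mod (st.2 * PySem.List.pyGetD vals i 0) pvP))
      (res0, currInv)
    PySem.List.pySetD st.1 0 st.2

-- ===== PORT B =====
def batch_inverse_alt (vals : List Int) : List Int :=
  let n : Int := PySem.List.len vals
  if n == 0 then []
  else
    let pre := (PySem.List.slice vals (some 1) none).foldl
      (fun pre v => pre ++ [PySem.Int.mod (PySem.List.pyGetD pre (-1) 0 * v) pvP])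
      [PySem.List.pyGetD vals 0 0]
    let st := vals.reverse.foldl
      (fun (st : List Int × Int) v =>
        let s := PySem.Int.mod (st.2 * v) pvP
        (st.1 ++ [s], s)) ([], 1)
    let suf := st.1.reverse
    let invTotal := pvModInv (PySem.List.pyGetD pre (-1) 0)
    (PySem.List.pyRange 0 n 1).map (fun i =>
      PySem.Int.mod
        (invTotal * (if i ≠ 0 then PySem.List.pyGetD pre (i - 1) 0 else 1)
          * (if i + 1 < n then PySem.List.pyGetD suf (i + 1) 0 else 1)) pvP)

-- ===== PRECONDITION & SPEC =====
-- Pre_ excludes exactly the inputs containing a multiple of the prime modulus pvP (inside Dom,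
-- only 0), on which Python's pow(_, -1, P) raises ValueError in both A and B.
def Pre_batch_inverse (vals : List Int) : Prop := ∀ v ∈ vals, PySem.Int.mod v pvP ≠ 0
instance (vals : List Int) : Decidable (Pre_batch_inverse vals) := by
  unfold Pre_batch_inverse; infer_instance

def pvWitness_batch_inverse : List Int := [1, 2, 3]

def Spec_batch_inverse (vals : List Int) (out : List Int) : Prop := out = batch_inverse_alt vals
instance (vals : List Int) (out : List Int) : Decidable (Spec_batch_inverse vals out) := by
  unfold Spec_batch_inverse; infer_instance

-- ===== CLAIM (what is proved, stated in full; the proofs are below) =====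
def Claim_equal_batch_inverse : Prop := ∀ (vals : List Int), Dom_batch_inverse vals → Pre_batch_inverse vals → Spec_batch_inverse vals (batch_inverse vals)

-- ===== LEMMAS AND PROOFS =====

-- the chain of reduced running products (b*v₁)%P, ((b*v₁)*v₂)%P, … of a seed b through a list
def pvChain (b : Int) : List Int → List Int
  | [] => []
  | v :: r => PySem.Int.mod (b * v) pvP :: pvChain (PySem.Int.mod (b * v) pvP) r

theorem pvP_pos : (0 : Int) < pvP := by decide

theorem pv_mulmod_l (x y : Int) : x % pvP * y % pvP = x * y % pvP := by
  conv_rhs => rw [Int.mul_emod]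
  rw [Int.mul_emod (x % pvP) y, Int.emod_emod_of_dvd x dvd_rfl]

theorem pv_mulmod_r (x y : Int) : x * (y % pvP) % pvP = x * y % pvP := by
  conv_rhs => rw [Int.mul_emod]
  rw [Int.mul_emod x (y % pvP), Int.emod_emod_of_dvd y dvd_rfl]

theorem pvModInv_mod (x : Int) : pvModInv x % pvP = pvModInv x := by
  unfold pvModInv
  rw [PySem.Int.mod_eq_emod_of_pos pvP_pos]
  exact Int.emod_emod_of_dvd _ dvd_rfl

theorem pvChain_length (b : Int) (l : List Int) : (pvChain b l).length = l.length := by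
  induction l generalizing b with
  | nil => rfl
  | cons v r ih => simp [pvChain, ih]

theorem pvChain_getElem (b : Int) (l : List Int) (k : Nat) (hk : k < l.length) :
    (pvChain b l)[k]'(by rw [pvChain_length]; exact hk) = b * (l.take (k + 1)).prod % pvP := by
  induction l generalizing b k with
  | nil => simp at hk
  | cons v r ih =>
    cases k with
    | zero => simp [pvChain]; rw [PySem.Int.mod_eq_emod_of_pos pvP_pos]
    | succ k =>
      simp only [pvChain, List.getElem_cons_succ]
      rw [ih _ k (by simpa using hk), PySem.Int.mod_eq_emod_of_pos pvP_pos,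
        pv_mulmod_l, List.take_succ_cons, List.prod_cons, mul_assoc]

-- the prefix-product list both programs build: first element raw, the rest reduced mod pvP
def pvPL : List Int → List Int
  | [] => []
  | v :: r => v :: pvChain v r

-- the reduced suffix-product list B builds
def pvSUF (vals : List Int) : List Int := (pvChain 1 vals.reverse).reverse

def pvInvT (vals : List Int) : Int := pvModInv (PySem.List.pyGetD (pvPL vals) (-1) 0)

-- the value B's comprehension body computes at index i
def pvOUT (vals : List Int) (i : Int) : Int :=
  PySem.Int.mod
    (pvInvT vals * (if i ≠ 0 then PySem.List.pyGetD (pvPL vals) (i - 1) 0 else 1)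
      * (if i + 1 < (vals.length : Int) then PySem.List.pyGetD (pvSUF vals) (i + 1) 0 else 1)) pvP

-- the common mathematical target value of entry j
def pvTGT (vals : List Int) (j : Nat) : Int :=
  pvInvT vals * (vals.take j).prod * (vals.drop (j + 1)).prod % pvP

theorem pvPL_length (vals : List Int) : (pvPL vals).length = vals.length := by
  cases vals with
  | nil => rfl
  | cons v r => simp [pvPL, pvChain_length]

theorem pvPL_getElem_mod (vals : List Int) (k : Nat) (hk : k < vals.length) :
    (pvPL vals)[k]'(by rw [pvPL_length]; exact hk) % pvP = (vals.take (k + 1)).prod % pvP := by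
  cases vals with
  | nil => simp at hk
  | cons v r =>
    cases k with
    | zero => simp [pvPL]
    | succ k =>
      simp only [pvPL, List.getElem_cons_succ]
      rw [pvChain_getElem _ _ _ (by simpa using hk), Int.emod_emod_of_dvd _ dvd_rfl,
        List.take_succ_cons, List.prod_cons]

theorem pvPL_getElem_succ (vals : List Int) (k : Nat) (hk : k + 1 < vals.length) :
    (pvPL vals)[k + 1]'(by rw [pvPL_length]; exact hk) =
      (pvPL vals)[k]'(by rw [pvPL_length]; omega) * vals[k + 1] % pvP := by
  cases vals with
  | nil => simp at hk
  | cons v r =>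
    cases k with
    | zero =>
      cases r with
      | nil => simp at hk
      | cons b t =>
        simp only [pvPL, pvChain, List.getElem_cons_succ, List.getElem_cons_zero]
        rw [PySem.Int.mod_eq_emod_of_pos pvP_pos]
    | succ k =>
      simp only [pvPL, List.getElem_cons_succ]
      rw [pvChain_getElem _ _ _ (by simpa using hk), pvChain_getElem _ _ _ (by simp only [List.length_cons] at hk; omega),
        pv_mulmod_l, List.prod_take_succ _ (k + 1) (by simpa using hk), mul_assoc]

theorem pvSUF_length (vals : List Int) : (pvSUF vals).length = vals.length := by
  simp [pvSUF, pvChain_length]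

theorem pvSUF_getElem (vals : List Int) (j : Nat) (hj : j < vals.length) :
    (pvSUF vals)[j]'(by rw [pvSUF_length]; exact hj) = (vals.drop j).prod % pvP := by
  unfold pvSUF
  rw [List.getElem_reverse]
  simp only [pvChain_length, List.length_reverse]
  rw [pvChain_getElem 1 vals.reverse _ (by simp only [List.length_reverse]; omega)]
  have h2 : vals.length - 1 - j + 1 = vals.length - j := by omega
  rw [h2]
  have h3 : vals.reverse.take (vals.length - j) = (vals.drop j).reverse := by
    rw [List.take_reverse]
    have : vals.length - (vals.length - j) = j := by omega
    rw [this]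
  rw [h3, List.prod_reverse, one_mul]


theorem pv_mod_congr (c x y : Int) (h : x % pvP = y % pvP) : c * x % pvP = c * y % pvP := by
  rw [← pv_mulmod_r, h, pv_mulmod_r]

theorem pvOUT_char (vals : List Int) (j : Nat) (hj : j < vals.length) :
    pvOUT vals (j : Int) = pvTGT vals j := by
  unfold pvOUT pvTGT
  rw [PySem.Int.mod_eq_emod_of_pos pvP_pos]
  cases j with
  | zero =>
    simp only [Nat.cast_zero, ne_eq, not_true_eq_false, if_false, List.take_zero,
      List.prod_nil, zero_add]
    by_cases h1 : (1 : Int) < (vals.length : Int)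
    · rw [if_pos h1]
      have h1' : 1 < vals.length := by exact_mod_cast h1
      rw [PySem.List.pyGetD_ofNat' (pvSUF vals) 1 0,
        List.getD_eq_getElem _ _ (by rw [pvSUF_length]; omega), pvSUF_getElem _ _ h1',
        pv_mulmod_r]
    · rw [if_neg h1]
      have h1' : vals.length = 1 := by omega
      have hd : vals.drop 1 = [] := List.drop_eq_nil_of_le (by omega)
      rw [hd]
      simp
  | succ k =>
    have hne : ((k + 1 : Nat) : Int) ≠ 0 := by push_cast; omega
    rw [if_pos hne]
    have hc1 : ((k + 1 : Nat) : Int) - 1 = ((k : Nat) : Int) := by push_cast; ring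
    rw [hc1, PySem.List.pyGetD_natCast,
      List.getD_eq_getElem _ _ (by rw [pvPL_length]; omega)]
    by_cases h2 : ((k + 1 : Nat) : Int) + 1 < (vals.length : Int)
    · rw [if_pos h2]
      have hlt : k + 2 < vals.length := by push_cast at h2; omega
      rw [show ((k + 1 : Nat) : Int) + 1 = ((k + 2 : Nat) : Int) by push_cast; ring,
        PySem.List.pyGetD_natCast, List.getD_eq_getElem _ _ (by rw [pvSUF_length]; omega),
        pvSUF_getElem _ _ hlt, pv_mulmod_r, mul_right_comm,
        pv_mod_congr _ _ _ (pvPL_getElem_mod vals k (by omega)), mul_right_comm]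
    · rw [if_neg h2]
      have hlen : vals.length = k + 2 := by push_cast at h2; omega
      have hdrop : vals.drop (k + 1 + 1) = [] := by
        apply List.drop_eq_nil_of_le; omega
      rw [hdrop]
      simp only [List.prod_nil, mul_one]
      rw [pv_mod_congr _ _ _ (pvPL_getElem_mod vals k (by omega))]

theorem pv_foldB (l : List Int) (acc : List Int) (x : Int) :
    l.foldl (fun pre v => pre ++ [PySem.Int.mod (PySem.List.pyGetD pre (-1) 0 * v) pvP])
        (acc ++ [x]) = acc ++ x :: pvChain x l := by
  induction l generalizing acc x with
  | nil => simp [pvChain]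
  | cons v r ih =>
    simp only [List.foldl_cons, pvChain]
    rw [PySem.List.pyGetD_neg_one_append_singleton]
    have h := ih (acc ++ [x]) (PySem.Int.mod (x * v) pvP)
    simpa [List.append_assoc] using h

theorem pv_foldS (l : List Int) (acc : List Int) (s : Int) :
    (l.foldl (fun (st : List Int × Int) v =>
        (st.1 ++ [PySem.Int.mod (st.2 * v) pvP], PySem.Int.mod (st.2 * v) pvP)) (acc, s)).1
      = acc ++ pvChain s l := by
  induction l generalizing acc s with
  | nil => simp [pvChain]
  | cons v r ih =>
    simp only [List.foldl_cons, pvChain]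
    rw [ih]
    simp [List.append_assoc]

theorem pv_foldA_pfx (v0 : Int) (rest : List Int) (m : Nat) (hm : m ≤ rest.length) :
    (PySem.List.pyRange 1 (1 + (m : Int)) 1).foldl
      (fun pr i => PySem.List.pySetD pr i
        (PySem.Int.mod (PySem.List.pyGetD pr (i - 1) 0 * PySem.List.pyGetD (v0 :: rest) i 0) pvP))
      (v0 :: List.replicate rest.length 0)
    = (pvPL (v0 :: rest)).take (m + 1) ++ List.replicate (rest.length - m) 0 := by
  have hPLlen : (pvPL (v0 :: rest)).length = rest.length + 1 := by
    rw [pvPL_length]; rfl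
  induction m with
  | zero =>
    rw [show (1 + ((0 : Nat) : Int)) = 1 by norm_num, PySem.List.pyRange_one_eq_nil (by norm_num)]
    simp [pvPL, List.take_succ_cons]
  | succ m ih =>
    have hm' : m ≤ rest.length := by omega
    have hmlt : m < rest.length := by omega
    rw [show (1 + ((m + 1 : Nat) : Int)) = (1 + (m : Int)) + 1 by push_cast; ring,
      PySem.List.pyRange_one_succ_right (by omega), List.foldl_append,
      ih hm']
    simp only [List.foldl_cons, List.foldl_nil]
    rw [show (1 + (m : Int)) = ((m + 1 : Nat) : Int) by push_cast; ring,
      show ((m + 1 : Nat) : Int) - 1 = ((m : Nat) : Int) by push_cast; ring,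
      PySem.List.pyGetD_natCast, PySem.List.pyGetD_natCast, PySem.List.pySetD_natCast]
    have hget1 : ((pvPL (v0 :: rest)).take (m + 1) ++ List.replicate (rest.length - m) 0).getD m 0
        = (pvPL (v0 :: rest))[m]'(by omega) := by
      rw [List.getD_eq_getElem _ _ (by
        simp only [List.length_append, List.length_take, List.length_replicate]; omega)]
      rw [List.getElem_append_left (by simp [List.length_take]; omega)]
      exact List.getElem_take
    have hget2 : (v0 :: rest).getD (m + 1) 0 = (v0 :: rest)[m + 1]'(by simpa using hmlt) :=
      List.getD_eq_getElem _ _ (by simpa using hmlt)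
    rw [hget1, hget2, PySem.Int.mod_eq_emod_of_pos pvP_pos,
      ← pvPL_getElem_succ (v0 :: rest) m (by simpa using hmlt)]
    -- list surgery: setting slot m+1 extends the materialized prefix by one
    rw [List.set_append]
    simp only [List.length_take, hPLlen]
    rw [if_neg (by omega)]
    have hrep : List.replicate (rest.length - m) (0 : Int)
        = 0 :: List.replicate (rest.length - (m + 1)) 0 := by
      rw [show rest.length - m = (rest.length - (m + 1)) + 1 by omega, List.replicate_succ]
    rw [hrep]
    have hmin : min (m + 1) (rest.length + 1) = m + 1 := by omega
    rw [hmin, show m + 1 - (m + 1) = 0 by omega, List.set_cons_zero]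
    have htake : List.take (m + 1 + 1) (pvPL (v0 :: rest))
        = List.take (m + 1) (pvPL (v0 :: rest)) ++ [(pvPL (v0 :: rest))[m + 1]'(by omega)] := by
      rw [List.take_add_one, List.getElem?_eq_getElem (by omega)]
      simp
    rw [htake, List.append_assoc, List.singleton_append]

-- the body of A's backward loop, with its prefix list already identified as pvPL vals
def pvStepA (vals : List Int) (st : List Int × Int) (i : Int) : List Int × Int :=
  (PySem.List.pySetD st.1 i
     (PySem.Int.mod (st.2 * PySem.List.pyGetD (pvPL vals) (i - 1) 0) pvP),
   PySem.Int.mod (st.2 * PySem.List.pyGetD vals i 0) pvP)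

theorem pv_foldBack (vals : List Int) (k : Nat) (hk : k < vals.length)
    (res : List Int) (curr : Int)
    (hlen : res.length = vals.length)
    (hres : ∀ j : Nat, j < vals.length → k < j → res.getD j 0 = pvTGT vals j)
    (hc1 : curr % pvP = curr)
    (hc2 : curr % pvP = pvInvT vals * (vals.drop (k + 1)).prod % pvP) :
    ((PySem.List.pyRange (k : Int) 0 (-1)).foldl (pvStepA vals) (res, curr)).1.length
        = vals.length
    ∧ (∀ j : Nat, j < vals.length → 0 < j →
        ((PySem.List.pyRange (k : Int) 0 (-1)).foldl (pvStepA vals) (res, curr)).1.getD j 0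
          = pvTGT vals j)
    ∧ ((PySem.List.pyRange (k : Int) 0 (-1)).foldl (pvStepA vals) (res, curr)).2
        = pvInvT vals * (vals.drop 1).prod % pvP := by
  induction k generalizing res curr with
  | zero =>
    rw [Nat.cast_zero, PySem.List.pyRange_neg_one_eq_nil (le_refl 0)]
    simp only [List.foldl_nil]
    refine ⟨hlen, fun j hj hj0 => hres j hj hj0, ?_⟩
    rw [← hc1, hc2]
  | succ k ih =>
    have hk' : k < vals.length := by omega
    rw [PySem.List.pyRange_neg_one_cons (by positivity),
      show ((k + 1 : Nat) : Int) - 1 = ((k : Nat) : Int) by push_cast; ring,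
      List.foldl_cons]
    have hstep : pvStepA vals (res, curr) ((k + 1 : Nat) : Int)
        = (res.set (k + 1) (PySem.Int.mod (curr * (pvPL vals)[k]'(by rw [pvPL_length]; omega)) pvP),
           PySem.Int.mod (curr * vals[k + 1]'(by omega)) pvP) := by
      unfold pvStepA
      rw [show ((k + 1 : Nat) : Int) - 1 = ((k : Nat) : Int) by push_cast; ring,
        PySem.List.pyGetD_natCast, PySem.List.pyGetD_natCast, PySem.List.pySetD_natCast,
        List.getD_eq_getElem _ _ (by rw [pvPL_length]; omega),
        List.getD_eq_getElem _ _ (by omega)]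
    rw [hstep]
    apply ih hk'
    · rw [List.length_set]; exact hlen
    · intro j hj hjk
      rcases Nat.lt_or_ge (k + 1) j with hgt | hle
      · rw [List.getD_eq_getElem _ _ (by rw [List.length_set, hlen]; omega),
          List.getElem_set_ne (by omega)]
        rw [← List.getD_eq_getElem _ _ (by omega : j < res.length)]
        exact hres j hj hgt
      · have hj1 : j = k + 1 := by omega
        subst hj1
        rw [List.getD_eq_getElem _ _ (by rw [List.length_set, hlen]; omega),
          List.getElem_set_self (by rw [List.length_set, hlen]; omega)]
        rw [PySem.Int.mod_eq_emod_of_pos pvP_pos, ← pv_mulmod_l, hc2, pv_mulmod_l,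
          pv_mod_congr _ _ _ (pvPL_getElem_mod vals k (by omega)), mul_right_comm]
        rfl
    · rw [PySem.Int.mod_eq_emod_of_pos pvP_pos]
      exact Int.emod_emod_of_dvd _ dvd_rfl
    · rw [PySem.Int.mod_eq_emod_of_pos pvP_pos, Int.emod_emod_of_dvd _ dvd_rfl,
        ← pv_mulmod_l, hc2, pv_mulmod_l]
      have hx : pvInvT vals * (vals.drop (k + 1 + 1)).prod * vals[k + 1]'(by omega)
          = pvInvT vals * (vals.drop (k + 1)).prod := by
        rw [List.drop_eq_getElem_cons (by omega : k + 1 < vals.length), List.prod_cons]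
        ring
      rw [hx]

theorem pv_B_eq (vals : List Int) (hne : vals ≠ []) :
    batch_inverse_alt vals = (PySem.List.pyRange 0 (vals.length : Int) 1).map (pvOUT vals) := by
  cases vals with
  | nil => exact absurd rfl hne
  | cons v0 rest =>
    unfold batch_inverse_alt
    simp only [PySem.List.len_eq]
    rw [if_neg (by simp; omega)]
    rw [PySem.List.slice_from_one, List.tail_cons, PySem.List.pyGetD_zero_cons]
    have hpre : rest.foldl
        (fun pre v => pre ++ [PySem.Int.mod (PySem.List.pyGetD pre (-1) 0 * v) pvP]) [v0]
        = pvPL (v0 :: rest) := by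
      have h := pv_foldB rest [] v0
      simpa [pvPL] using h
    rw [hpre]
    have hsuf : ((v0 :: rest).reverse.foldl
        (fun (st : List Int × Int) v =>
          (st.1 ++ [PySem.Int.mod (st.2 * v) pvP], PySem.Int.mod (st.2 * v) pvP)) ([], 1)).1
        = pvChain 1 (v0 :: rest).reverse := by
      have h := pv_foldS (v0 :: rest).reverse [] 1
      simpa using h
    rw [hsuf]
    rfl

theorem pv_A_eq (vals : List Int) (hne : vals ≠ []) :
    batch_inverse vals = (PySem.List.pyRange 0 (vals.length : Int) 1).map (pvOUT vals) := by
  cases vals with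
  | nil => exact absurd rfl hne
  | cons v0 rest =>
    unfold batch_inverse
    simp only [PySem.List.len_eq]
    rw [if_neg (by simp; omega)]
    rw [show (v0 :: rest).length = rest.length + 1 from rfl, List.replicate_succ,
      PySem.List.pyGetD_zero_cons]
    rw [show PySem.List.pySetD (0 :: List.replicate rest.length 0) 0 v0
        = v0 :: List.replicate rest.length 0 by
      rw [PySem.List.pySetD_of_nonneg _ _ (le_refl 0), Int.toNat_zero, List.set_cons_zero]]
    have hpfx : (PySem.List.pyRange 1 ((rest.length + 1 : Nat) : Int) 1).foldl
        (fun pr i => PySem.List.pySetD pr i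
          (PySem.Int.mod (PySem.List.pyGetD pr (i - 1) 0 * PySem.List.pyGetD (v0 :: rest) i 0) pvP))
        (v0 :: List.replicate rest.length 0)
        = pvPL (v0 :: rest) := by
      rw [show ((rest.length + 1 : Nat) : Int) = 1 + (rest.length : Int) by push_cast; ring,
        pv_foldA_pfx v0 rest rest.length (le_refl _)]
      simp only [Nat.sub_self, List.replicate_zero, List.append_nil]
      rw [List.take_of_length_le (by rw [pvPL_length]; rfl)]
    rw [hpfx]
    rw [show (fun (st : List Int × Int) i =>
        (PySem.List.pySetD st.1 i
           (PySem.Int.mod (st.2 * PySem.List.pyGetD (pvPL (v0 :: rest)) (i - 1) 0) pvP),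
         PySem.Int.mod (st.2 * PySem.List.pyGetD (v0 :: rest) i 0) pvP))
      = pvStepA (v0 :: rest) from rfl]
    rw [show ((rest.length + 1 : Nat) : Int) - 1 = ((rest.length : Nat) : Int) by
      push_cast; ring]
    obtain ⟨h1, h2, h3⟩ := pv_foldBack (v0 :: rest) rest.length (by simp)
      (0 :: List.replicate rest.length 0) (pvInvT (v0 :: rest))
      (by simp)
      (by intro j hj hjk; simp at hj; omega)
      (pvModInv_mod _)
      (by rw [List.drop_eq_nil_of_le (by simp), List.prod_nil, mul_one])
    rw [show pvModInv (PySem.List.pyGetD (pvPL (v0 :: rest)) (-1) 0)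
        = pvInvT (v0 :: rest) from rfl]
    rw [PySem.List.pySetD_of_nonneg _ _ (le_refl 0), Int.toNat_zero]
    apply List.ext_getElem
    · rw [List.length_set, h1, List.length_map, PySem.List.length_pyRange_one]
      simp
    · intro j hj1 hj2
      have hjlen : j < (v0 :: rest).length := by rwa [List.length_set, h1] at hj1
      have hmapel : ((PySem.List.pyRange 0 ((rest.length + 1 : Nat) : Int) 1).map
            (pvOUT (v0 :: rest)))[j]'hj2 = pvTGT (v0 :: rest) j := by
        rw [List.getElem_map, PySem.List.getElem_pyRange_one, zero_add]
        exact pvOUT_char _ _ hjlen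
      rw [hmapel]
      cases j with
      | zero =>
        rw [List.getElem_set_self hj1, h3]
        unfold pvTGT
        simp
      | succ j =>
        rw [List.getElem_set_ne (by omega)]
        rw [← List.getD_eq_getElem _ 0 (by rw [h1]; exact hjlen)]
        exact h2 (j + 1) hjlen (by omega)

-- ===== VERDICT (by name: the statement is the Claim_ definition above) =====
theorem batch_inverse_spec : Claim_equal_batch_inverse := by
  intro vals _ _
  unfold Spec_batch_inverse
  by_cases hne : vals = []
  · subst hne; rfl
  · rw [pv_A_eq vals hne, pv_B_eq vals hne]
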